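-- pv_equiv track=rewrite | github.com/rahulbalaji13/PLACEMENT | LeetCode/DCCFeb2026/trionicArrI.py | isTrionic
-- ===== SOURCE A (Python) =====
-- def isTrionic(nums):
--     """
--     :type nums: List[int]
--     :rtype: bool
--     """
--     n = len(nums)
--     i = 1
--
--     # For Increasing
--     while i < n and nums[i - 1] < nums[i]:
--         i += 1
--     p = i - 1
--
--     # For Decresing
--     while i < n and nums[i - 1] > nums[i]:
--         i += 1
--     q = i - 1
--
--     # For Increasing
--     while i < n and nums[i - 1] < nums[i]:
--         i += 1
--     flag = i - 1
--
--     return (p != 0 and q != p) and (flag == n - 1 and flag != q)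
-- ===== SOURCE B (Python) =====
-- def isTrionic(nums):
--     signs = [(nums[j] < nums[j + 1]) - (nums[j] > nums[j + 1])
--              for j in range(len(nums) - 1)]
--     runs = []
--     for s in signs:
--         if not runs or runs[-1] != s:
--             runs.append(s)
--     return runs == [1, -1, 1]
-- ===== Notes on version B (the rewrite author's own statement) =====
-- stated objective: alternative
-- what changed: Replaces the three greedy index-advancing while-loops over nums by building the list of consecutive-difference signs, run-length compressing it in one fold, and testing that the compressed runs are exactly one increasing, one decreasing, one increasing run.
import Mathlib
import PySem

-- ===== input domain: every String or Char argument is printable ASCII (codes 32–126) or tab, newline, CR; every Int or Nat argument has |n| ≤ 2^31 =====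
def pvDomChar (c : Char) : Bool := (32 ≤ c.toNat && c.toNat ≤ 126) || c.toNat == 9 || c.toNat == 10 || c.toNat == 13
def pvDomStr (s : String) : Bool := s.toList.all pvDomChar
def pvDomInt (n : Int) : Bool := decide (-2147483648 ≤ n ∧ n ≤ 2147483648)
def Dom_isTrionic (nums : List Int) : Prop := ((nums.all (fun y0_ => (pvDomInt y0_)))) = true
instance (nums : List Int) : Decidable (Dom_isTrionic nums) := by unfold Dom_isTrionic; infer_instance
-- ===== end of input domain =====

-- B re-implements the three greedy pointer phases as: build the consecutive-difference
-- sign list, run-length compress it with one fold, and check the compressed run pattern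
-- is exactly up, down, up. Objective: alternative (same O(n) cost, different structure).

-- ===== PORT A =====
-- first/third while loop: advance i while i < n and nums[i-1] < nums[i].
-- All accesses are at indices provably in range (1 ≤ i < n), so getD is exact.
def goUp (nums : List Int) (n i : Nat) : Nat :=
  if h : i < n ∧ nums.getD (i - 1) 0 < nums.getD i 0 then goUp nums n (i + 1) else i
termination_by n - i
decreasing_by omega

-- second while loop: advance i while i < n and nums[i-1] > nums[i]
def goDown (nums : List Int) (n i : Nat) : Nat :=
  if h : i < n ∧ nums.getD i 0 < nums.getD (i - 1) 0 then goDown nums n (i + 1) else i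
termination_by n - i
decreasing_by omega

def isTrionic (nums : List Int) : Bool :=
  let n := nums.length
  let i1 := goUp nums n 1
  let p := i1 - 1
  let i2 := goDown nums n i1
  let q := i2 - 1
  let i3 := goUp nums n i2
  let flag := i3 - 1
  decide ((p ≠ 0 ∧ q ≠ p) ∧ ((flag : Int) = (n : Int) - 1 ∧ flag ≠ q))

-- ===== PORT B =====
-- (a < b) - (a > b) on Python bools
def sign (a b : Int) : Int := (if a < b then 1 else 0) - (if a > b then 1 else 0)

def signsB (nums : List Int) : List Int :=
  (List.range (nums.length - 1)).map (fun j => sign (nums.getD j 0) (nums.getD (j + 1) 0))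

def isTrionic_alt (nums : List Int) : Bool :=
  ((signsB nums).foldl
      (fun runs x => if runs = [] ∨ runs.getLast? ≠ some x then runs ++ [x] else runs) [])
    == [1, -1, 1]

-- ===== PRECONDITION & SPEC =====
def Spec_isTrionic (nums : List Int) (out : Bool) : Prop := out = isTrionic_alt nums
instance (nums : List Int) (out : Bool) : Decidable (Spec_isTrionic nums out) := by unfold Spec_isTrionic; infer_instance

-- ===== CLAIM (what is proved, stated in full; the proofs are below) =====
def Claim_equal_isTrionic : Prop := ∀ (nums : List Int), Dom_isTrionic nums → Spec_isTrionic nums (isTrionic nums)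

-- ===== LEMMAS AND PROOFS =====

-- run-length lengths of A's three phases, over the sign list
def twA (s : List Int) : Nat := (s.takeWhile (fun d => d == (1 : Int))).length
def twB (s : List Int) : Nat := ((s.drop (twA s)).takeWhile (fun d => d == (-1 : Int))).length
def twC (s : List Int) : Nat := ((s.drop (twA s + twB s)).takeWhile (fun d => d == (1 : Int))).length
def ABC (s : List Int) : Prop := 0 < twA s ∧ 0 < twB s ∧ 0 < twC s ∧ twA s + twB s + twC s = s.length

-- canonical "up-down-up" shape of the sign list
def S3 (s : List Int) : Prop :=
  ∃ a b c, 0 < a ∧ 0 < b ∧ 0 < c ∧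
    s = List.replicate a 1 ++ (List.replicate b (-1) ++ List.replicate c 1)

-- run compression with the previously kept element
def g : Option Int → List Int → List Int
  | _, [] => []
  | last, x :: r => if last = some x then g (some x) r else x :: g (some x) r

theorem length_signsB (nums : List Int) : (signsB nums).length = nums.length - 1 := by
  simp [signsB]

theorem sign_eq_one (a b : Int) : sign a b = 1 ↔ a < b := by
  unfold sign; split_ifs <;> omega

theorem sign_eq_negone (a b : Int) : sign a b = -1 ↔ b < a := by
  unfold sign; split_ifs <;> omega

theorem drop_signsB (nums : List Int) (i : Nat) (h1 : 1 ≤ i) (h2 : i < nums.length) :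
    (signsB nums).drop (i - 1)
      = sign (nums.getD (i - 1) 0) (nums.getD i 0) :: (signsB nums).drop i := by
  have hl : i - 1 < (signsB nums).length := by rw [length_signsB]; omega
  have hi : i - 1 + 1 = i := by omega
  rw [List.drop_eq_getElem_cons hl, hi]
  congr 1
  simp only [signsB, List.getElem_map, List.getElem_range]
  rw [hi]


theorem goUp_eq (nums : List Int) : ∀ fuel i, nums.length - i ≤ fuel → 1 ≤ i →
    goUp nums nums.length i
      = i + (((signsB nums).drop (i - 1)).takeWhile (fun d => d == (1 : Int))).length := by
  intro fuel
  induction fuel with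
  | zero =>
    intro i hf h1
    rw [goUp]
    rw [dif_neg (by omega)]
    have hnil : (signsB nums).drop (i - 1) = [] :=
      List.drop_eq_nil_of_le (by rw [length_signsB]; omega)
    simp [hnil]
  | succ fuel ih =>
    intro i hf h1
    rw [goUp]
    by_cases hc : i < nums.length ∧ nums.getD (i - 1) 0 < nums.getD i 0
    · rw [dif_pos hc]
      rw [ih (i + 1) (by omega) (by omega)]
      rw [drop_signsB nums i h1 hc.1]
      have hs : ((sign (nums.getD (i - 1) 0) (nums.getD i 0)) == (1 : Int)) = true := by
        simp only [beq_iff_eq, sign_eq_one]; exact hc.2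
      rw [List.takeWhile_cons, if_pos hs]
      have : i + 1 - 1 = i := by omega
      rw [this]
      simp [Nat.add_comm, Nat.add_assoc]
    · rw [dif_neg hc]
      rcases Nat.lt_or_ge i nums.length with hlt | hge
      · have hnlt : ¬ nums.getD (i - 1) 0 < nums.getD i 0 := fun h => hc ⟨hlt, h⟩
        rw [drop_signsB nums i h1 hlt]
        have hs : ¬ (((sign (nums.getD (i - 1) 0) (nums.getD i 0)) == (1 : Int)) = true) := by
          simp only [beq_iff_eq, sign_eq_one]; exact hnlt
        rw [List.takeWhile_cons, if_neg hs]
        simp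
      · have hnil : (signsB nums).drop (i - 1) = [] :=
          List.drop_eq_nil_of_le (by rw [length_signsB]; omega)
        simp [hnil]


theorem goDown_eq (nums : List Int) : ∀ fuel i, nums.length - i ≤ fuel → 1 ≤ i →
    goDown nums nums.length i
      = i + (((signsB nums).drop (i - 1)).takeWhile (fun d => d == (-1 : Int))).length := by
  intro fuel
  induction fuel with
  | zero =>
    intro i hf h1
    rw [goDown]
    rw [dif_neg (by omega)]
    have hnil : (signsB nums).drop (i - 1) = [] :=
      List.drop_eq_nil_of_le (by rw [length_signsB]; omega)
    simp [hnil]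
  | succ fuel ih =>
    intro i hf h1
    rw [goDown]
    by_cases hc : i < nums.length ∧ nums.getD i 0 < nums.getD (i - 1) 0
    · rw [dif_pos hc]
      rw [ih (i + 1) (by omega) (by omega)]
      rw [drop_signsB nums i h1 hc.1]
      have hs : ((sign (nums.getD (i - 1) 0) (nums.getD i 0)) == (-1 : Int)) = true := by
        simp only [beq_iff_eq, sign_eq_negone]; exact hc.2
      rw [List.takeWhile_cons, if_pos hs]
      have : i + 1 - 1 = i := by omega
      rw [this]
      simp [Nat.add_comm, Nat.add_assoc]
    · rw [dif_neg hc]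
      rcases Nat.lt_or_ge i nums.length with hlt | hge
      · have hnlt : ¬ nums.getD i 0 < nums.getD (i - 1) 0 := fun h => hc ⟨hlt, h⟩
        rw [drop_signsB nums i h1 hlt]
        have hs : ¬ (((sign (nums.getD (i - 1) 0) (nums.getD i 0)) == (-1 : Int)) = true) := by
          simp only [beq_iff_eq, sign_eq_negone]; exact hnlt
        rw [List.takeWhile_cons, if_neg hs]
        simp
      · have hnil : (signsB nums).drop (i - 1) = [] :=
          List.drop_eq_nil_of_le (by rw [length_signsB]; omega)
        simp [hnil]


theorem A_iff (nums : List Int) : isTrionic nums = true ↔ ABC (signsB nums) := by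
  have hn := length_signsB nums
  have ha : goUp nums nums.length 1 = 1 + twA (signsB nums) := by
    rw [goUp_eq nums nums.length 1 (by omega) (le_refl 1)]; rfl
  have hb : goDown nums nums.length (1 + twA (signsB nums))
      = 1 + twA (signsB nums) + twB (signsB nums) := by
    rw [goDown_eq nums nums.length _ (by omega) (by omega)]
    have h' : 1 + twA (signsB nums) - 1 = twA (signsB nums) := by omega
    rw [h']; rfl
  have hc : goUp nums nums.length (1 + twA (signsB nums) + twB (signsB nums))
      = 1 + twA (signsB nums) + twB (signsB nums) + twC (signsB nums) := by
    rw [goUp_eq nums nums.length _ (by omega) (by omega)]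
    have h' : 1 + twA (signsB nums) + twB (signsB nums) - 1
        = twA (signsB nums) + twB (signsB nums) := by omega
    rw [h']; rfl
  simp only [isTrionic, ha, hb, hc, decide_eq_true_eq]
  unfold ABC
  omega

theorem take_len_takeWhile (p : Int → Bool) : ∀ s : List Int, s.take (s.takeWhile p).length = s.takeWhile p := by
  intro s
  induction s with
  | nil => rfl
  | cons x r ih => by_cases h : p x <;> simp [h, ih]

theorem tw_decomp (p : Int → Bool) (v : Int) (hv : ∀ d, p d = true ↔ d = v) (s : List Int) :
    s = List.replicate (s.takeWhile p).length v ++ s.drop (s.takeWhile p).length := by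
  have h1 : s.takeWhile p = List.replicate (s.takeWhile p).length v := by
    rw [List.eq_replicate_iff]
    exact ⟨rfl, fun b hb => (hv b).1 (List.mem_takeWhile_imp hb)⟩
  conv_lhs => rw [← List.take_append_drop (s.takeWhile p).length s]
  rw [take_len_takeWhile]
  conv_rhs => rw [← h1]

theorem takeWhile_replicate_append (p : Int → Bool) (x : Int) (hx : p x = true) :
    ∀ (k : Nat) (l : List Int),
      (List.replicate k x ++ l).takeWhile p = List.replicate k x ++ l.takeWhile p := by
  intro k
  induction k with
  | zero => intro l; simp
  | succ k ih => intro l; simp [List.replicate_succ, hx, ih]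

theorem ABC_iff_S3 (s : List Int) : ABC s ↔ S3 s := by
  constructor
  · rintro ⟨ha, hb, hc, hsum⟩
    have hv1 : ∀ d : Int, (d == (1 : Int)) = true ↔ d = 1 := fun d => by simp
    have hv2 : ∀ d : Int, (d == (-1 : Int)) = true ↔ d = -1 := fun d => by simp
    have d1 : s = List.replicate (twA s) 1 ++ s.drop (twA s) :=
      tw_decomp _ 1 hv1 s
    have d2 : s.drop (twA s)
        = List.replicate (twB s) (-1) ++ (s.drop (twA s)).drop (twB s) :=
      tw_decomp _ (-1) hv2 (s.drop (twA s))
    have hdd : (s.drop (twA s)).drop (twB s) = s.drop (twA s + twB s) := by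
      rw [List.drop_drop]
    have d3 : s.drop (twA s + twB s)
        = List.replicate (twC s) 1 ++ (s.drop (twA s + twB s)).drop (twC s) :=
      tw_decomp _ 1 hv1 (s.drop (twA s + twB s))
    have hr3 : (s.drop (twA s + twB s)).drop (twC s) = [] := by
      apply List.eq_nil_of_length_eq_zero
      simp only [List.length_drop]
      omega
    refine ⟨twA s, twB s, twC s, ha, hb, hc, ?_⟩
    rw [hr3, List.append_nil] at d3
    rw [hdd, d3] at d2
    rw [d2] at d1
    exact d1
  · rintro ⟨a, b, c, ha, hb, hc, hs⟩
    obtain ⟨b', rfl⟩ : ∃ b', b = b' + 1 := ⟨b - 1, by omega⟩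
    obtain ⟨c', rfl⟩ : ∃ c', c = c' + 1 := ⟨c - 1, by omega⟩
    have hA : twA s = a := by
      unfold twA
      rw [hs, takeWhile_replicate_append _ _ (by simp)]
      simp [List.replicate_succ]
    have hd1 : s.drop (twA s) = List.replicate (b' + 1) (-1) ++ List.replicate (c' + 1) 1 := by
      rw [hA, hs]
      exact List.drop_left' (by simp)
    have hB : twB s = b' + 1 := by
      unfold twB
      rw [hd1, takeWhile_replicate_append _ _ (by simp)]
      simp [List.replicate_succ]
    have hd2 : s.drop (twA s + twB s) = List.replicate (c' + 1) 1 := by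
      rw [hA, hB, hs, ← List.append_assoc]
      exact List.drop_left' (by simp)
    have hC : twC s = c' + 1 := by
      unfold twC
      rw [hd2]
      have : (List.replicate (c' + 1) (1 : Int)).takeWhile (fun d => d == (1 : Int))
          = List.replicate (c' + 1) (1 : Int) := by
        have h' := takeWhile_replicate_append (fun d => d == (1 : Int)) 1 (by simp) (c' + 1) []
        rwa [List.append_nil, List.takeWhile_nil, List.append_nil] at h'
      rw [this]
      simp
    have hlen : s.length = a + (b' + 1) + (c' + 1) := by rw [hs]; simp; omega
    exact ⟨by omega, by omega, by omega, by omega⟩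

theorem foldl_eq_g (t : List Int) : ∀ acc : List Int,
    t.foldl (fun runs x => if runs = [] ∨ runs.getLast? ≠ some x then runs ++ [x] else runs) acc
      = acc ++ g acc.getLast? t := by
  induction t with
  | nil => intro acc; simp [g]
  | cons x r ih =>
    intro acc
    simp only [List.foldl_cons]
    by_cases hl : acc.getLast? = some x
    · have hne : acc ≠ [] := by
        intro h; rw [h] at hl; simp at hl
      rw [if_neg (by simp [hl, hne])]
      rw [ih acc, hl]
      simp [g]
    · rw [if_pos (by tauto)]
      rw [ih (acc ++ [x]), List.getLast?_concat]
      simp only [g, if_neg (by simpa using hl)]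
      simp


theorem g_inv : ∀ (s : List Int) (v : Int),
    (g (some v) s = [] → ∃ k, s = List.replicate k v) ∧
    (∀ w, g (some v) s = [w] →
      ∃ j c, 0 < c ∧ w ≠ v ∧ s = List.replicate j v ++ List.replicate c w) ∧
    (∀ w1 w2, g (some v) s = [w1, w2] →
      ∃ j b c, 0 < b ∧ 0 < c ∧ w1 ≠ v ∧ w2 ≠ w1 ∧
        s = List.replicate j v ++ (List.replicate b w1 ++ List.replicate c w2)) := by
  intro s
  induction s with
  | nil =>
    intro v
    refine ⟨fun _ => ⟨0, rfl⟩, fun w h => by simp [g] at h, fun w1 w2 h => by simp [g] at h⟩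
  | cons x r ih =>
    intro v
    by_cases hvx : v = x
    · subst hvx
      have hg : g (some v) (v :: r) = g (some v) r := by simp [g]
      obtain ⟨ih0, ih1, ih2⟩ := ih v
      refine ⟨?_, ?_, ?_⟩
      · intro h; obtain ⟨k, hk⟩ := ih0 (hg ▸ h)
        exact ⟨k + 1, by simp [List.replicate_succ, hk]⟩
      · intro w h; obtain ⟨j, c, hc, hwv, hr⟩ := ih1 w (hg ▸ h)
        exact ⟨j + 1, c, hc, hwv, by simp [List.replicate_succ, hr]⟩
      · intro w1 w2 h; obtain ⟨j, b, c, hb, hc, h1, h2, hr⟩ := ih2 w1 w2 (hg ▸ h)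
        exact ⟨j + 1, b, c, hb, hc, h1, h2, by simp [List.replicate_succ, hr]⟩
    · have hg : g (some v) (x :: r) = x :: g (some x) r := by
        simp [g]; intro h; exact absurd h hvx
      obtain ⟨ih0, ih1, ih2⟩ := ih x
      refine ⟨?_, ?_, ?_⟩
      · intro h; rw [hg] at h; simp at h
      · intro w h; rw [hg] at h
        obtain ⟨hxw, htail⟩ : x = w ∧ g (some x) r = [] := by
          constructor <;> [exact (List.cons.injEq .. ▸ h).1; exact (List.cons.injEq .. ▸ h).2]
        obtain ⟨k, hk⟩ := ih0 htail
        refine ⟨0, k + 1, by omega, by rw [← hxw]; exact Ne.symm hvx, ?_⟩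
        simp [List.replicate_succ, hk, ← hxw]
      · intro w1 w2 h; rw [hg] at h
        obtain ⟨hxw, htail⟩ : x = w1 ∧ g (some x) r = [w2] := by
          constructor <;> [exact (List.cons.injEq .. ▸ h).1; exact (List.cons.injEq .. ▸ h).2]
        obtain ⟨j, c, hc, hw2, hr⟩ := ih1 w2 htail
        refine ⟨0, j + 1, c, by omega, hc, by rw [← hxw]; exact Ne.symm hvx, by rw [← hxw]; exact hw2, ?_⟩
        simp [List.replicate_succ, hr, ← hxw]


theorem g_skip (v : Int) : ∀ (k : Nat) (l : List Int), g (some v) (List.replicate k v ++ l) = g (some v) l := by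
  intro k
  induction k with
  | zero => intro l; simp
  | succ k ih => intro l; simp [List.replicate_succ, g, ih]


theorem B_iff (nums : List Int) : isTrionic_alt nums = true ↔ S3 (signsB nums) := by
  unfold isTrionic_alt
  rw [beq_iff_eq, foldl_eq_g]
  simp only [List.getLast?_nil, List.nil_append]
  constructor
  · intro h
    cases hs : signsB nums with
    | nil => rw [hs] at h; simp [g] at h
    | cons x r =>
      rw [hs] at h
      have hx : g (none : Option Int) (x :: r) = x :: g (some x) r := by simp [g]
      rw [hx] at h
      have hx1 : x = 1 := (List.cons.injEq .. ▸ h).1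
      have htail : g (some x) r = [-1, 1] := (List.cons.injEq .. ▸ h).2
      rw [hx1] at htail
      obtain ⟨j, b, c, hb, hc, _, _, hr⟩ := ((g_inv r 1).2.2) (-1) 1 htail
      refine ⟨j + 1, b, c, by omega, hb, hc, ?_⟩
      rw [hx1, hr]
      simp [List.replicate_succ]
  · rintro ⟨a, b, c, ha, hb, hc, hs⟩
    rw [hs]
    obtain ⟨a', rfl⟩ : ∃ a', a = a' + 1 := ⟨a - 1, by omega⟩
    obtain ⟨b', rfl⟩ : ∃ b', b = b' + 1 := ⟨b - 1, by omega⟩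
    obtain ⟨c', rfl⟩ : ∃ c', c = c' + 1 := ⟨c - 1, by omega⟩
    have e1 : List.replicate (a' + 1) (1 : Int) ++ (List.replicate (b' + 1) (-1) ++ List.replicate (c' + 1) 1)
        = 1 :: (List.replicate a' 1 ++ (List.replicate (b' + 1) (-1) ++ List.replicate (c' + 1) 1)) := by
      simp [List.replicate_succ]
    rw [e1]
    have h0 : g none (1 :: (List.replicate a' 1 ++ (List.replicate (b' + 1) (-1) ++ List.replicate (c' + 1) 1)))
        = 1 :: g (some 1) (List.replicate a' 1 ++ (List.replicate (b' + 1) (-1) ++ List.replicate (c' + 1) 1)) := by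
      simp [g]
    rw [h0, g_skip]
    have e2 : List.replicate (b' + 1) (-1 : Int) ++ List.replicate (c' + 1) 1
        = (-1) :: (List.replicate b' (-1) ++ List.replicate (c' + 1) 1) := by
      simp [List.replicate_succ]
    rw [e2]
    have h1 : g (some 1) ((-1) :: (List.replicate b' (-1) ++ List.replicate (c' + 1) 1))
        = (-1) :: g (some (-1)) (List.replicate b' (-1) ++ List.replicate (c' + 1) 1) := by
      simp [g]
    rw [h1, g_skip]
    have e3 : List.replicate (c' + 1) (1 : Int) = 1 :: (List.replicate c' 1 ++ []) := by
      simp [List.replicate_succ]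
    rw [e3]
    have h2 : g (some (-1)) (1 :: (List.replicate c' 1 ++ []))
        = 1 :: g (some 1) (List.replicate c' 1 ++ []) := by
      simp [g]
    rw [h2, g_skip]
    rfl

-- ===== VERDICT (by name: the statement is the Claim_ definition above) =====
theorem isTrionic_spec : Claim_equal_isTrionic := by
  intro nums _
  unfold Spec_isTrionic
  have hA := A_iff nums
  have hB := B_iff nums
  have hP := ABC_iff_S3 (signsB nums)
  cases h1 : isTrionic nums <;> cases h2 : isTrionic_alt nums <;> simp_all
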